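-- pv_equiv track=rewrite | github.com/Rjuhl/Chessposition-recognition | advancedBoardDetector.py | orderPeiceImg
-- ===== SOURCE A (Python) =====
-- def orderPeiceImg(img_arr): # Test this
--
--     new_arr = []
--     left_over_arr = img_arr.copy()
--     for i in range(8):
--         sort1 = sorted(left_over_arr, key=lambda arg: arg[0][1])
--         left_over_arr = sort1[8:]
--         sort2 = sorted(sort1[:8], key=lambda arg: arg[0][0])
--         new_arr = new_arr + sort2[:8]
--     return new_arr
-- ===== SOURCE B (Python) =====
-- def orderPeiceImg(img_arr):
--     s = sorted(img_arr, key=lambda a: a[0][1])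
--     new_arr = []
--     for i in range(8):
--         new_arr += sorted(s[8 * i:8 * i + 8], key=lambda a: a[0][0])
--     return new_arr
-- ===== Notes on version B (the rewrite author's own statement) =====
-- stated objective: simpler
-- what changed: B sorts the whole list by y once and then sorts each fixed 8-element chunk by x, instead of A's per-round full re-sort of the leftover list; stability makes the chunks identical.
import Mathlib
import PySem

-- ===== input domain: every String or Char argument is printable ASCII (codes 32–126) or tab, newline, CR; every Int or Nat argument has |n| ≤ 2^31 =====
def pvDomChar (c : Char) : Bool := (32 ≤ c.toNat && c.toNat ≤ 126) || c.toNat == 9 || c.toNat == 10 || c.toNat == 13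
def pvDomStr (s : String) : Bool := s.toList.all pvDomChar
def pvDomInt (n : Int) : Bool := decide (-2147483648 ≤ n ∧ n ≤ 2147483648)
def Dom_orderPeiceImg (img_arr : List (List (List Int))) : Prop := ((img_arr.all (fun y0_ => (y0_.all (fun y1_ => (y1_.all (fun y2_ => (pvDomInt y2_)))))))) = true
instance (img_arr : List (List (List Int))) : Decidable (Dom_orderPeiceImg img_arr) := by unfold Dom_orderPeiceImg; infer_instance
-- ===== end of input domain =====

-- B sorts the whole list by y once and then sorts each fixed 8-element chunk by x,
-- instead of A's per-round full re-sort of the leftover list (simpler decomposition).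


-- ===== PORT A =====
-- key lambdas 'arg[0][1]' / 'arg[0][0]'; pyGetD's default is never reached inside Pre_
def pvKeyY (a : List (List Int)) : Int := PySem.List.pyGetD (PySem.List.pyGetD a 0 []) 1 0
def pvKeyX (a : List (List Int)) : Int := PySem.List.pyGetD (PySem.List.pyGetD a 0 []) 0 0

def orderPeiceImg (img_arr : List (List (List Int))) : List (List (List Int)) :=
  ((PySem.List.pyRange 0 8 1).foldl
    (fun (st : List (List (List Int)) × List (List (List Int))) _ =>
      let sort1 := PySem.List.sorted st.2 pvKeyY
      let left_over := PySem.List.slice sort1 (some 8) none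
      let sort2 := PySem.List.sorted (PySem.List.slice sort1 none (some 8)) pvKeyX
      (st.1 ++ PySem.List.slice sort2 none (some 8), left_over))
    ([], img_arr)).1

-- ===== PORT B =====
def orderPeiceImg_alt (img_arr : List (List (List Int))) : List (List (List Int)) :=
  let s := PySem.List.sorted img_arr pvKeyY
  (PySem.List.pyRange 0 8 1).foldl
    (fun acc i =>
      acc ++ PySem.List.sorted (PySem.List.slice s (some (8 * i)) (some (8 * i + 8))) pvKeyX)
    []

-- ===== PRECONDITION & SPEC =====
-- Pre_ excludes exactly the inputs where A's sort keys 'arg[0][1]' raise IndexError: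
-- every element must be nonempty and its first inner list must have length ≥ 2.
def Pre_orderPeiceImg (img_arr : List (List (List Int))) : Prop :=
  ∀ e ∈ img_arr, 1 ≤ e.length ∧ 2 ≤ (e.headD []).length
instance (img_arr : List (List (List Int))) : Decidable (Pre_orderPeiceImg img_arr) := by
  unfold Pre_orderPeiceImg; infer_instance

def pvWitness_orderPeiceImg : List (List (List Int)) := [[[3, 4]], [[1, 2]], [[5, 0]]]

def Spec_orderPeiceImg (img_arr : List (List (List Int))) (out : List (List (List Int))) : Prop := out = orderPeiceImg_alt img_arr
instance (img_arr : List (List (List Int))) (out : List (List (List Int))) : Decidable (Spec_orderPeiceImg img_arr out) := by unfold Spec_orderPeiceImg; infer_instance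

-- ===== CLAIM (what is proved, stated in full; the proofs are below) =====
def Claim_equal_orderPeiceImg : Prop := ∀ (img_arr : List (List (List Int))), Dom_orderPeiceImg img_arr → Pre_orderPeiceImg img_arr → Spec_orderPeiceImg img_arr (orderPeiceImg img_arr)

-- ===== LEMMAS AND PROOFS =====

-- sorting an already-sorted suffix again is the identity (Python's sort is stable)
lemma pv_sorted_drop (xs : List (List (List Int))) (n : Nat) :
    PySem.List.sorted ((PySem.List.sorted xs pvKeyY false).drop n) pvKeyY false
      = (PySem.List.sorted xs pvKeyY false).drop n := by
  apply PySem.List.sorted_eq_self_of_pairwise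
  exact (PySem.List.sorted_pairwise xs pvKeyY).sublist (List.drop_sublist n _)

-- sort2[:8] = sort2, since sort2 sorts a list of length ≤ 8
lemma pv_take_sorted_take (l : List (List (List Int))) :
    (PySem.List.sorted (l.take 8) pvKeyX false).take 8
      = PySem.List.sorted (l.take 8) pvKeyX false := by
  apply List.take_of_length_le
  rw [PySem.List.length_sorted]
  exact List.length_take_le 8 l

lemma pv_seg0 (xs : List (List (List Int))) :
    PySem.List.slice xs (some (8 * 0)) (some (8 * 0 + 8)) = (xs.drop 0).take 8 := by
  simp [pysem]
lemma pv_seg1 (xs : List (List (List Int))) :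
    PySem.List.slice xs (some (8 * 1)) (some (8 * 1 + 8)) = (xs.drop 8).take 8 := by
  simp [pysem]
lemma pv_seg2 (xs : List (List (List Int))) :
    PySem.List.slice xs (some (8 * 2)) (some (8 * 2 + 8)) = (xs.drop 16).take 8 := by
  simp [pysem]
lemma pv_seg3 (xs : List (List (List Int))) :
    PySem.List.slice xs (some (8 * 3)) (some (8 * 3 + 8)) = (xs.drop 24).take 8 := by
  simp [pysem]
lemma pv_seg4 (xs : List (List (List Int))) :
    PySem.List.slice xs (some (8 * 4)) (some (8 * 4 + 8)) = (xs.drop 32).take 8 := by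
  simp [pysem]
lemma pv_seg5 (xs : List (List (List Int))) :
    PySem.List.slice xs (some (8 * 5)) (some (8 * 5 + 8)) = (xs.drop 40).take 8 := by
  simp [pysem]
lemma pv_seg6 (xs : List (List (List Int))) :
    PySem.List.slice xs (some (8 * 6)) (some (8 * 6 + 8)) = (xs.drop 48).take 8 := by
  simp [pysem]
lemma pv_seg7 (xs : List (List (List Int))) :
    PySem.List.slice xs (some (8 * 7)) (some (8 * 7 + 8)) = (xs.drop 56).take 8 := by
  simp [pysem]

lemma pv_slice_from8 (xs : List (List (List Int))) :
    PySem.List.slice xs (some 8) none = xs.drop 8 := by simp [pysem]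

lemma pv_slice_to8 (xs : List (List (List Int))) :
    PySem.List.slice xs none (some 8) = xs.take 8 := by simp [pysem]

lemma pv_equiv (img_arr : List (List (List Int))) :
    orderPeiceImg img_arr = orderPeiceImg_alt img_arr := by
  have hr : PySem.List.pyRange 0 8 1 = [0, 1, 2, 3, 4, 5, 6, 7] := by decide
  unfold orderPeiceImg orderPeiceImg_alt
  rw [hr]
  simp only [List.foldl]

  simp only [pv_seg0, pv_seg1, pv_seg2, pv_seg3, pv_seg4, pv_seg5, pv_seg6, pv_seg7,
    pv_slice_from8, pv_slice_to8, List.drop_drop, pv_sorted_drop, pv_take_sorted_take,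
    List.nil_append, List.append_assoc]
  norm_num

-- ===== VERDICT (by name: the statement is the Claim_ definition above) =====
theorem orderPeiceImg_spec : Claim_equal_orderPeiceImg := by
  intro img_arr _ _
  unfold Spec_orderPeiceImg
  exact pv_equiv img_arr
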